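-- pv_equiv track=rewrite | github.com/LorentsAn/Itmo_Discrete_Math | lab_combinatorics/Task1.py | bin_vector
-- ===== SOURCE A (Python) =====
-- def bin_vector(args):
--     if len(args) == 1:
--         return args
--     for i in range(len(args) // 2):
--         args[i] = args[i] + "0"
--
--     for i in range(len(args) // 2, len(args)):
--         args[i] = args[i] + "1"
--
--     args[0: len(args) // 2] = bin_vector(args[0: len(args) // 2])
--     args[len(args) // 2: len(args)] = bin_vector(args[len(args) // 2: len(args)])
--
--     return args
-- ===== SOURCE B (Python) =====
-- def bin_vector(args):
--     n = len(args)
--     for i in range(n):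
--         lo, hi = 0, n
--         code = []
--         while hi - lo > 1:
--             mid = lo + (hi - lo) // 2
--             if i < mid:
--                 code.append("0")
--                 hi = mid
--             else:
--                 code.append("1")
--                 lo = mid
--         args[i] = args[i] + "".join(code)
--     return args
-- ===== Notes on version B (the rewrite author's own statement) =====
-- stated objective: alternative
-- what changed: A recursively halves the list, appending '0'/'1' to the copied halves and writing them back via slice assignment; B computes each element's code independently with a per-index binary-search loop over (lo, hi) and appends it in one pass, so B terminates (returning []) on the empty list where A recurses forever.
import Mathlib
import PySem

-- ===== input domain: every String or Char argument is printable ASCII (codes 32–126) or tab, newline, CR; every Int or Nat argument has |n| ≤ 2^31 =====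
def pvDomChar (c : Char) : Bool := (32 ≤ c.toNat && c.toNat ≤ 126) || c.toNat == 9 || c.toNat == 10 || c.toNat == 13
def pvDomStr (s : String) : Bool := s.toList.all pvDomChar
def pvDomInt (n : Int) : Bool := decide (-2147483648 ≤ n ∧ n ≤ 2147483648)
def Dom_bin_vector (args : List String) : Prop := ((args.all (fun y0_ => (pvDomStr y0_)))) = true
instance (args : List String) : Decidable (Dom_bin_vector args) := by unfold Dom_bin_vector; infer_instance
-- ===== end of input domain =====

-- B replaces A's slice-copying divide-and-conquer recursion by a per-element binary-search
-- loop that computes each element's code directly (alternative decomposition; return-value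
-- equivalence — both Pythons also mutate `args` in place identically).

-- ===== PORT A =====
-- Literal port of A's recursion. The `length = 0` branch only makes the Lean recursion total:
-- the Python recurses forever on [], which Pre_bin_vector excludes.
def bin_vector (args : List String) : List String :=
  if args.length = 1 then args
  else if args.length = 0 then args
  else
    bin_vector ((args.take (args.length / 2)).map (fun s => s ++ "0")) ++
    bin_vector ((args.drop (args.length / 2)).map (fun s => s ++ "1"))
termination_by args.length
decreasing_by
  · simp only [List.length_map, List.length_take]; omega
  · simp only [List.length_map, List.length_drop]; omega

-- ===== PORT B =====
-- the inner `while hi - lo > 1` loop of Source B, building the code string as it narrows the range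
def pvCodeLoop (lo hi i : Nat) : String :=
  if hi - lo ≤ 1 then ""
  else
    let mid := lo + (hi - lo) / 2
    if i < mid then "0" ++ pvCodeLoop lo mid i
    else "1" ++ pvCodeLoop mid hi i
termination_by hi - lo
decreasing_by all_goals omega

def bin_vector_alt (args : List String) : List String :=
  args.mapIdx (fun i s => s ++ pvCodeLoop 0 args.length i)

-- ===== PRECONDITION & SPEC =====
-- Pre_ excludes only the empty list, on which Python A recurses forever (RecursionError).
def Pre_bin_vector (args : List String) : Prop := args ≠ []
instance (args : List String) : Decidable (Pre_bin_vector args) := by unfold Pre_bin_vector; infer_instance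
def pvWitness_bin_vector : List String := (["a", "b", "c"])

def Spec_bin_vector (args : List String) (out : List String) : Prop := out = bin_vector_alt args
instance (args : List String) (out : List String) : Decidable (Spec_bin_vector args out) := by unfold Spec_bin_vector; infer_instance

-- ===== CLAIM (what is proved, stated in full; the proofs are below) =====
def Claim_equal_bin_vector : Prop := ∀ (args : List String), Dom_bin_vector args → Pre_bin_vector args → Spec_bin_vector args (bin_vector args)

-- ===== LEMMAS AND PROOFS =====

-- pvCodeLoop only depends on the width hi - lo and the offset i - lo
theorem pvCodeLoop_shift (k : Nat) : ∀ lo hi i d : Nat, hi - lo ≤ k →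
    pvCodeLoop (lo + d) (hi + d) (i + d) = pvCodeLoop lo hi i := by
  induction k with
  | zero =>
    intro lo hi i d h
    rw [pvCodeLoop, pvCodeLoop]
    simp only [show hi + d - (lo + d) = hi - lo by omega]
    rw [if_pos (by omega), if_pos (by omega)]
  | succ k ih =>
    intro lo hi i d h
    rw [pvCodeLoop, pvCodeLoop]
    simp only [show hi + d - (lo + d) = hi - lo by omega]
    by_cases h1 : hi - lo ≤ 1
    · rw [if_pos h1, if_pos h1]
    · rw [if_neg h1, if_neg h1]
      by_cases h2 : i < lo + (hi - lo) / 2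
      · rw [if_pos (by omega), if_pos h2,
          show lo + d + (hi - lo) / 2 = lo + (hi - lo) / 2 + d by omega,
          ih lo (lo + (hi - lo) / 2) i d (by omega)]
      · rw [if_neg (by omega), if_neg h2,
          show lo + d + (hi - lo) / 2 = lo + (hi - lo) / 2 + d by omega,
          ih (lo + (hi - lo) / 2) hi i d (by omega)]

theorem main_eq (n : Nat) : ∀ args : List String, args.length = n →
    bin_vector args = args.mapIdx (fun i s => s ++ pvCodeLoop 0 args.length i) := by
  induction n using Nat.strong_induction_on with
  | _ n ih =>
    intro args hlen
    match n, args, hlen with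
    | 0, args, hlen =>
      have : args = [] := List.eq_nil_of_length_eq_zero hlen
      subst this; rw [bin_vector]; simp
    | 1, args, hlen =>
      match args with
      | [s] =>
        rw [bin_vector]
        simp [pvCodeLoop, String.append_empty]
    | (m + 2), args, hlen =>
      have h2 : 2 ≤ args.length := by omega
      rw [bin_vector, if_neg (by omega), if_neg (by omega)]
      have hLlen : ((args.take (args.length / 2)).map (fun s => s ++ "0")).length
          = args.length / 2 := by
        simp only [List.length_map, List.length_take]; omega
      have hRlen : ((args.drop (args.length / 2)).map (fun s => s ++ "1")).length
          = args.length - args.length / 2 := by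
        simp only [List.length_map, List.length_drop]
      rw [ih (args.length / 2) (by omega) _ hLlen,
          ih (args.length - args.length / 2) (by omega) _ hRlen, hLlen, hRlen]
      apply List.ext_getElem
      · simp only [List.length_append, List.length_mapIdx, List.length_map,
          List.length_take, List.length_drop]; omega
      · intro i hi₁ hi₂
        have hiN : i < args.length := by
          simpa only [List.length_mapIdx] using hi₂
        by_cases hcase : i < args.length / 2
        · rw [List.getElem_append,
            dif_pos (by rw [List.length_mapIdx, hLlen]; exact hcase),
            List.getElem_mapIdx, List.getElem_mapIdx, List.getElem_map, List.getElem_take]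
          conv_rhs => rw [pvCodeLoop]
          rw [if_neg (by omega)]
          simp only [Nat.sub_zero, Nat.zero_add]
          rw [if_pos hcase, String.append_assoc]
        · rw [List.getElem_append,
            dif_neg (by rw [List.length_mapIdx, hLlen]; exact hcase),
            List.getElem_mapIdx, List.getElem_mapIdx, List.getElem_map, List.getElem_drop]
          simp only [List.length_mapIdx, hLlen]
          conv_rhs => rw [pvCodeLoop]
          rw [if_neg (by omega)]
          simp only [Nat.sub_zero, Nat.zero_add]
          rw [if_neg hcase]
          have hsh : pvCodeLoop (args.length / 2) args.length i
              = pvCodeLoop 0 (args.length - args.length / 2) (i - args.length / 2) := by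
            have := pvCodeLoop_shift (args.length - args.length / 2) 0
              (args.length - args.length / 2) (i - args.length / 2) (args.length / 2)
              (by omega)
            rw [show 0 + args.length / 2 = args.length / 2 by omega,
              show args.length - args.length / 2 + args.length / 2 = args.length by omega,
              show i - args.length / 2 + args.length / 2 = i by omega] at this
            exact this
          rw [hsh, String.append_assoc]
          simp only [show args.length / 2 + (i - args.length / 2) = i from by omega]

-- ===== VERDICT (by name: the statement is the Claim_ definition above) =====
theorem bin_vector_spec : Claim_equal_bin_vector := by
  intro args _ _
  unfold Spec_bin_vector bin_vector_alt
  exact main_eq args.length args rfl
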